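-- pv_equiv track=rewrite | github.com/babygramps/Weather- | check_models.py | fmt_rain_window
-- ===== SOURCE A (Python) =====
-- def fmt_hour_12h(h: int) -> str:
--     suffix = "AM" if h < 12 else "PM"
--     hr12 = 12 if h % 12 == 0 else h % 12
--     return f"{hr12}{suffix}"
--
-- def fmt_rain_window(hours: list[int]) -> str:
--     if not hours:
--         return ""
--     if len(hours) >= 20:
--         return "all day"
--     hours = sorted(hours)
--     runs: list[tuple[int, int]] = []
--     start = prev = hours[0]
--     for h in hours[1:]:
--         if h == prev + 1:
--             prev = h
--         else:
--             runs.append((start, prev))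
--             start = prev = h
--     runs.append((start, prev))
--     # Display: hour H means rain "during the hour starting at H",
--     # so a run [14, 15, 16] renders as "2PM-5PM" (end is last+1).
--     return " & ".join(f"{fmt_hour_12h(s)}-{fmt_hour_12h((e + 1) % 24)}" for s, e in runs)
-- ===== SOURCE B (Python) =====
-- def fmt_hour_12h(h: int) -> str:
--     suffix = "AM" if h < 12 else "PM"
--     hr12 = 12 if h % 12 == 0 else h % 12
--     return f"{hr12}{suffix}"
--
-- def fmt_rain_window(hours: list[int]) -> str:
--     # Recursive decomposition: peel one maximal consecutive run at a time and
--     # format it immediately, instead of building a (start, prev) run list first.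
--     if not hours:
--         return ""
--     if len(hours) >= 20:
--         return "all day"
--
--     def windows(x, xs):
--         e = x
--         while xs and xs[0] == e + 1:
--             e = xs[0]
--             xs = xs[1:]
--         part = f"{fmt_hour_12h(x)}-{fmt_hour_12h((e + 1) % 24)}"
--         return [part] if not xs else [part] + windows(xs[0], xs[1:])
--
--     hs = sorted(hours)
--     return " & ".join(windows(hs[0], hs[1:]))
-- ===== Notes on version B (the rewrite author's own statement) =====
-- stated objective: alternative
-- what changed: Replaces A's accumulator loop that builds a (start,prev) run list and then joins it with a recursive decomposition that peels one maximal consecutive run off the sorted list at a time and formats it immediately.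
import Mathlib
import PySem

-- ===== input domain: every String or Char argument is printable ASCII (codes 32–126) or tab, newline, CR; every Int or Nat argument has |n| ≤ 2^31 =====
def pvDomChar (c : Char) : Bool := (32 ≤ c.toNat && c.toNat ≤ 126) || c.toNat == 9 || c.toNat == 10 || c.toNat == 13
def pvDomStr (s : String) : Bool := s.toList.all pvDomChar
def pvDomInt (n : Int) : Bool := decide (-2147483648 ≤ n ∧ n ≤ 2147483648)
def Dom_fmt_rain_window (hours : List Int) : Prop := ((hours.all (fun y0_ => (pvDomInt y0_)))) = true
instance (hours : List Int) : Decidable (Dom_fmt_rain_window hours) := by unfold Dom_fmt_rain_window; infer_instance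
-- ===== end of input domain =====

-- B replaces A's run-list-building accumulator loop by a recursion that peels one
-- maximal consecutive run at a time and formats it immediately (alternative decomposition).

-- ===== PORT A =====
def fmt_hour_12h (h : Int) : String :=
  let suffix := if h < 12 then "AM" else "PM"
  let hr12 : Int := if PySem.Int.mod h 12 = 0 then 12 else PySem.Int.mod h 12
  PySem.Int.toStr hr12 ++ suffix

def fmt_rain_window (hours : List Int) : String :=
  if hours = [] then ""
  else if 20 ≤ hours.length then "all day"
  else
    match PySem.List.sorted hours (fun x => x) false with
    | [] => ""   -- unreachable: sorted of a nonempty list is nonempty (hours[0] never raises)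
    | h0 :: rest =>
      let st := rest.foldl
        (fun (st : List (Int × Int) × Int × Int) h =>
          if h = st.2.2 + 1 then (st.1, st.2.1, h)
          else (st.1 ++ [(st.2.1, st.2.2)], h, h))
        ([], h0, h0)
      let runs := st.1 ++ [(st.2.1, st.2.2)]
      PySem.Str.join " & "
        (runs.map (fun se => fmt_hour_12h se.1 ++ "-" ++ fmt_hour_12h (PySem.Int.mod (se.2 + 1) 24)))

-- ===== PORT B =====
-- the inner `while xs and xs[0] == e + 1` loop of Source B: returns (e, remaining xs)
def pvChase (e : Int) : List Int → Int × List Int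
  | [] => (e, [])
  | h :: t => if h = e + 1 then pvChase h t else (e, h :: t)

theorem pvChase_snd_length (e : Int) (xs : List Int) : (pvChase e xs).2.length ≤ xs.length := by
  induction xs generalizing e with
  | nil => simp [pvChase]
  | cons h t ih =>
    simp only [pvChase]
    split
    · exact le_trans (ih h) (Nat.le_succ _)
    · exact le_refl _

def pvWindows (x : Int) (xs : List Int) : List String :=
  let p := pvChase x xs
  let part := fmt_hour_12h x ++ "-" ++ fmt_hour_12h (PySem.Int.mod (p.1 + 1) 24)
  if h : p.2 = [] then [part]                      -- `return [part] if not xs else …`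
  else part :: pvWindows (p.2.head h) p.2.tail     -- `windows(xs[0], xs[1:])`
termination_by xs.length
decreasing_by
  have hle := pvChase_snd_length x xs
  have hpos : 0 < (pvChase x xs).2.length := List.length_pos_iff.mpr h
  simp only [List.length_tail]
  omega

def fmt_rain_window_alt (hours : List Int) : String :=
  if hours = [] then ""
  else if 20 ≤ hours.length then "all day"
  else
    match PySem.List.sorted hours (fun x => x) false with
    | [] => ""   -- unreachable: hs[0] on a nonempty sorted list never raises
    | h0 :: rest => PySem.Str.join " & " (pvWindows h0 rest)

-- ===== PRECONDITION & SPEC =====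
def Spec_fmt_rain_window (hours : List Int) (out : String) : Prop := out = fmt_rain_window_alt hours
instance (hours : List Int) (out : String) : Decidable (Spec_fmt_rain_window hours out) := by unfold Spec_fmt_rain_window; infer_instance

-- ===== CLAIM (what is proved, stated in full; the proofs are below) =====
def Claim_equal_fmt_rain_window : Prop := ∀ (hours : List Int), Dom_fmt_rain_window hours → Spec_fmt_rain_window hours (fmt_rain_window hours)

-- ===== LEMMAS AND PROOFS =====

-- abstract characterisation of the run list A's fold builds
def pvRunsOf (s p : Int) : List Int → List (Int × Int)
  | [] => [(s, p)]
  | h :: t => if h = p + 1 then pvRunsOf s h t else (s, p) :: pvRunsOf h h t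

def pvRender (se : Int × Int) : String :=
  fmt_hour_12h se.1 ++ "-" ++ fmt_hour_12h (PySem.Int.mod (se.2 + 1) 24)

-- fused form of `(pvRunsOf s p t).map pvRender`, the bridge between the two ports
def pvW2 (s p : Int) : List Int → List String
  | [] => [pvRender (s, p)]
  | h :: t => if h = p + 1 then pvW2 s h t else pvRender (s, p) :: pvW2 h h t

theorem pvFold_runs (t : List Int) : ∀ (acc : List (Int × Int)) (s p : Int),
    (let st := t.foldl
        (fun (st : List (Int × Int) × Int × Int) h =>
          if h = st.2.2 + 1 then (st.1, st.2.1, h)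
          else (st.1 ++ [(st.2.1, st.2.2)], h, h)) (acc, s, p)
     st.1 ++ [(st.2.1, st.2.2)]) = acc ++ pvRunsOf s p t := by
  induction t with
  | nil => intro acc s p; simp [pvRunsOf]
  | cons h t ih =>
    intro acc s p
    simp only [List.foldl_cons, pvRunsOf]
    by_cases hh : h = p + 1
    · simp only [hh, if_true]
      exact ih acc s (p + 1)
    · simp only [if_neg hh]
      rw [ih (acc ++ [(s, p)]) h h]
      simp

theorem pvW2_runs (t : List Int) : ∀ (s p : Int),
    pvW2 s p t = (pvRunsOf s p t).map pvRender := by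
  induction t with
  | nil => intro s p; simp [pvW2, pvRunsOf]
  | cons h t ih =>
    intro s p
    by_cases hh : h = p + 1
    · simp only [pvW2, pvRunsOf, if_pos hh]
      exact ih s h
    · simp only [pvW2, pvRunsOf, if_neg hh, List.map_cons]
      rw [ih h h]

-- pvW2 seen through the chase: it emits the run ending at (pvChase p t).1 and continues
theorem pvW2_chase (t : List Int) : ∀ (s p : Int),
    pvW2 s p t =
      pvRender (s, (pvChase p t).1) ::
        (match (pvChase p t).2 with
         | [] => ([] : List String)
         | y :: t' => pvW2 y y t') := by
  induction t with
  | nil => intro s p; simp [pvW2, pvChase]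
  | cons h t ih =>
    intro s p
    by_cases hh : h = p + 1
    · simp only [pvW2, pvChase, if_pos hh]
      exact ih s h
    · simp only [pvW2, pvChase, if_neg hh]

theorem pvWindows_W2 : ∀ (n : Nat) (xs : List Int), xs.length ≤ n → ∀ (x : Int),
    pvWindows x xs = pvW2 x x xs := by
  intro n
  induction n with
  | zero =>
    intro xs hlen x
    have hxs : xs = [] := List.length_eq_zero_iff.mp (Nat.le_zero.mp hlen)
    subst hxs
    rw [pvWindows]
    simp [pvChase, pvW2, pvRender]
  | succ n ih =>
    intro xs hlen x
    rw [pvWindows, pvW2_chase]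
    cases hcp : pvChase x xs with
    | mk e rest =>
      cases rest with
      | nil => simp [pvRender]
      | cons y t =>
        have hle := pvChase_snd_length x xs
        rw [hcp] at hle
        simp only [List.length_cons] at hle
        have ht : t.length ≤ n := by omega
        simp [pvRender, ih t ht y]

theorem pvWindows_eq (x : Int) (xs : List Int) :
    (pvRunsOf x x xs).map pvRender = pvWindows x xs := by
  rw [pvWindows_W2 xs.length xs (le_refl _) x, pvW2_runs]

-- ===== VERDICT (by name: the statement is the Claim_ definition above) =====
theorem fmt_rain_window_spec : Claim_equal_fmt_rain_window := by
  intro hours _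
  unfold Spec_fmt_rain_window fmt_rain_window fmt_rain_window_alt
  split_ifs with h1 h2
  · rfl
  · rfl
  · cases hs : PySem.List.sorted hours (fun x => x) false with
    | nil => rfl
    | cons h0 rest =>
      simp only []
      rw [show (fun se : Int × Int => fmt_hour_12h se.1 ++ "-" ++ fmt_hour_12h (PySem.Int.mod (se.2 + 1) 24)) = pvRender from rfl]
      rw [pvFold_runs rest [] h0 h0]
      rw [List.nil_append, pvWindows_eq]
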